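-- pv_equiv track=rewrite | github.com/Atlantropaz/enigma | wordmaze/grader.py | _all_diagonals_SE
-- ===== SOURCE A (Python) =====
-- def _all_diagonals_SE(grid):
--     H, W = len(grid), len(grid[0])
--     for r0 in range(H):
--         r, c = r0, 0
--         out = []
--         while r < H and c < W:
--             out.append(grid[r][c]); r += 1; c += 1
--         yield "".join(out)
--     for c0 in range(1, W):
--         r, c = 0, c0
--         out = []
--         while r < H and c < W:
--             out.append(grid[r][c]); r += 1; c += 1
--         yield "".join(out)
-- ===== SOURCE B (Python) =====
-- def _all_diagonals_SE(grid):
--     H, W = len(grid), len(grid[0])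
--     cells = [(r - c, row[c]) for r, row in enumerate(grid) for c in range(W)]
--     buckets = {}
--     for k, ch in cells:
--         buckets[k] = buckets.get(k, []) + [ch]
--     for r0 in range(H):
--         yield "".join(buckets.get(r0, []))
--     for c0 in range(1, W):
--         yield "".join(buckets.get(-c0, []))
-- ===== Notes on version B (the rewrite author's own statement) =====
-- stated objective: alternative
-- what changed: Replaces A's per-diagonal while-loop walks (one two-counter walk per yielded diagonal) by a single row-major pass that buckets every cell under the key r-c in a dict, then emits the buckets in A's yield order.
import Mathlib
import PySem

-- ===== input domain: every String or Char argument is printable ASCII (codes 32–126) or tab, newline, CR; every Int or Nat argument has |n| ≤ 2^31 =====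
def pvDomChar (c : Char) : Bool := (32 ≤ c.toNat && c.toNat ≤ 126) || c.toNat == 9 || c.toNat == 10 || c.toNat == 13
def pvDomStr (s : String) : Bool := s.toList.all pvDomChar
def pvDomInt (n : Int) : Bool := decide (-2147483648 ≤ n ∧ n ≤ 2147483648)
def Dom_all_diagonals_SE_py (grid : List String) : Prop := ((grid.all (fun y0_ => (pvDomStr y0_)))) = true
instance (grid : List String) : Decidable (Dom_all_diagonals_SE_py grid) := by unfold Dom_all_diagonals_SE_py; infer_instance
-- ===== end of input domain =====

-- B replaces A's per-diagonal while loops by one row-major pass that buckets every cell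
-- under the key r-c, then emits the buckets in A's order (objective: alternative decomposition, same cost).
-- Both ports read cells through a defaulted lookup; Pre_ (grid nonempty, every row at least
-- as long as the first) is exactly where the Python A returns instead of raising IndexError.

-- ===== PORT A =====
-- grid[r][c] on in-range indices (Pre_ guarantees every access below is in range)
def pvCharAt (row : String) (c : Nat) : Char := row.toList.getD c ' '

-- the 'while r < H and c < W: out.append(grid[r][c]); r += 1; c += 1' loop
def aDiagLoop (grid : List String) (H W : Nat) (r c : Nat) : List Char :=
  if _h : r < H ∧ c < W then
    pvCharAt (grid.getD r "") c :: aDiagLoop grid H W (r + 1) (c + 1)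
  else []
termination_by H - r
decreasing_by omega

def all_diagonals_SE_py (grid : List String) : List String :=
  let H := grid.length
  let W := (grid.headD "").toList.length
  (List.range H).map (fun r0 => String.ofList (aDiagLoop grid H W r0 0))
    ++ (List.range' 1 (W - 1)).map (fun c0 => String.ofList (aDiagLoop grid H W 0 c0))

-- ===== PORT B =====
-- [(r - c, row[c]) for r, row in enumerate(grid) for c in range(W)]
def bCells (grid : List String) (W : Nat) : List (Int × Char) :=
  (PySem.List.enumerate grid 0).flatMap
    (fun p => (List.range W).map (fun (c : Nat) => (p.1 - (c : Int), pvCharAt p.2 c)))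

-- buckets[k] = buckets.get(k, []) + [ch]
def bBuckets (grid : List String) (W : Nat) : PySem.Dict Int (List Char) :=
  (bCells grid W).foldl (fun d p => d.modify p.1 [] (· ++ [p.2])) PySem.Dict.empty

def all_diagonals_SE_py_alt (grid : List String) : List String :=
  let H := grid.length
  let W := (grid.headD "").toList.length
  let b := bBuckets grid W
  (List.range H).map (fun (r0 : Nat) => String.ofList (b.getD (r0 : Int) []))
    ++ (List.range' 1 (W - 1)).map (fun (c0 : Nat) => String.ofList (b.getD (-(c0 : Int)) []))

-- ===== PRECONDITION & SPEC =====
-- Exactly where the Python A returns: A raises IndexError on [] (grid[0]) and on any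
-- grid with a row shorter than the first row (grid[r][c] with c < W out of range).
def Pre_all_diagonals_SE_py (grid : List String) : Prop :=
  grid ≠ [] ∧ ∀ s ∈ grid, (grid.headD "").toList.length ≤ s.toList.length
instance (grid : List String) : Decidable (Pre_all_diagonals_SE_py grid) := by
  unfold Pre_all_diagonals_SE_py; infer_instance

def pvWitness_all_diagonals_SE_py : List String := ["abc", "def"]

def Spec_all_diagonals_SE_py (grid : List String) (out : List String) : Prop := out = all_diagonals_SE_py_alt grid
instance (grid : List String) (out : List String) : Decidable (Spec_all_diagonals_SE_py grid out) := by unfold Spec_all_diagonals_SE_py; infer_instance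

-- ===== CLAIM (what is proved, stated in full; the proofs are below) =====
def Claim_equal_all_diagonals_SE_py : Prop := ∀ (grid : List String), Dom_all_diagonals_SE_py grid → Pre_all_diagonals_SE_py grid → Spec_all_diagonals_SE_py grid (all_diagonals_SE_py grid)

-- ===== LEMMAS AND PROOFS =====

-- the chars of bucket k contributed by rows enumerated from s
def selFrom (W : Nat) (rows : List String) (s k : Int) : List Char :=
  (((PySem.List.enumerate rows s).flatMap
      (fun p => (List.range W).map (fun (c : Nat) => (p.1 - (c : Int), pvCharAt p.2 c)))).filter
    (fun p => p.1 == k)).map (·.2)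

lemma bucket_getD (grid : List String) (W : Nat) (k : Int) :
    (bBuckets grid W).getD k [] = selFrom W grid 0 k := by
  unfold bBuckets selFrom bCells
  rw [PySem.Dict.getD_foldl_modify_append]
  simp [PySem.Dict.empty, PySem.Dict.getD, PySem.Dict.get?]

lemma rowSel (W : Nat) (row : String) (s k : Int) :
    (((List.range W).map (fun (c : Nat) => (s - (c : Int), pvCharAt row c))).filter
        (fun p => p.1 == k)).map (·.2)
      = if 0 ≤ s - k ∧ s - k < (W : Int) then [pvCharAt row (s - k).toNat] else [] := by
  induction W with
  | zero =>
    have h0 : ¬ (0 ≤ s - k ∧ s - k < ((0 : Nat) : Int)) := by omega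
    rw [if_neg h0]
    simp
  | succ n ih =>
    rw [List.range_succ, List.map_append, List.filter_append, List.map_append, ih]
    by_cases h2 : 0 ≤ s - k ∧ s - k < ((n + 1 : Nat) : Int)
    · rw [if_pos h2]
      by_cases h : s - k = (n : Int)
      · rw [if_neg (by omega), List.nil_append]
        simp [show s - (n : Int) = k from by omega, show (s - k).toNat = n from by omega]
      · rw [if_pos (by push_cast at h2 ⊢; omega)]
        simp [show ((s - (n : Int)) == k) = false from by rw [beq_eq_false_iff_ne]; omega]
    · rw [if_neg h2, if_neg (by push_cast at h2 ⊢; omega)]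
      simp [show ((s - (n : Int)) == k) = false from by rw [beq_eq_false_iff_ne]; omega]

lemma selFrom_cons (W : Nat) (row : String) (rest : List String) (s k : Int) :
    selFrom W (row :: rest) s k
      = (if 0 ≤ s - k ∧ s - k < (W : Int) then [pvCharAt row (s - k).toNat] else [])
          ++ selFrom W rest (s + 1) k := by
  unfold selFrom
  rw [PySem.List.enumerate_cons, List.flatMap_cons, List.filter_append, List.map_append, rowSel]

-- after the diagonal has started (k ≤ s), the bucket collects consecutive cells
lemma selFrom_started (W : Nat) (rows : List String) : ∀ (s k : Int), k ≤ s →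
    selFrom W rows s k
      = (List.range (min rows.length (W - (s - k).toNat))).map
          (fun i => pvCharAt (rows.getD i "") ((s - k).toNat + i)) := by
  induction rows with
  | nil => intro s k _; simp [selFrom, PySem.List.enumerate_nil]
  | cons row rest ih =>
    intro s k hks
    rw [selFrom_cons, ih (s + 1) k (by omega)]
    by_cases hw : (s - k).toNat < W
    · have hcond : 0 ≤ s - k ∧ s - k < (W : Int) := by omega
      have hd : (s + 1 - k).toNat = (s - k).toNat + 1 := by omega
      have hmin : min (rest.length + 1) (W - (s - k).toNat)
          = min rest.length (W - (s - k).toNat - 1) + 1 := by omega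
      have hmap : List.map (fun i => pvCharAt ((row :: rest).getD i "") ((s - k).toNat + i))
            ((List.range (min rest.length (W - (s - k).toNat - 1))).map Nat.succ)
          = List.map (fun i => pvCharAt (rest.getD i "") ((s - k).toNat + 1 + i))
            (List.range (min rest.length (W - (s - k).toNat - 1))) := by
        rw [List.map_map]
        apply List.map_congr_left
        intro i _
        simp only [Function.comp_apply, Nat.succ_eq_add_one, List.getD_cons_succ]
        rw [show (s - k).toNat + (i + 1) = (s - k).toNat + 1 + i from by omega]
      rw [if_pos hcond, hd, List.length_cons, hmin, List.range_succ_eq_map, List.map_cons,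
        show W - ((s - k).toNat + 1) = W - (s - k).toNat - 1 from by omega, hmap]
      simp
    · have hcond : ¬ (0 ≤ s - k ∧ s - k < (W : Int)) := by omega
      have h1 : min (rest.length + 1) (W - (s - k).toNat) = 0 := by omega
      have h2 : min rest.length (W - (s + 1 - k).toNat) = 0 := by omega
      simp [h1, h2]
      omega

-- before the diagonal starts (s ≤ k), leading rows contribute nothing
lemma selFrom_skip (W : Nat) (rows : List String) : ∀ (s k : Int), s ≤ k →
    selFrom W rows s k = selFrom W (rows.drop (k - s).toNat) k k := by
  induction rows with
  | nil => intro s k _; simp [selFrom, PySem.List.enumerate_nil]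
  | cons row rest ih =>
    intro s k hsk
    by_cases h : s = k
    · subst h; simp
    · have hlt : s < k := by omega
      have hcond : ¬ (0 ≤ s - k ∧ s - k < (W : Int)) := by omega
      have hdrop : (k - s).toNat = (k - (s + 1)).toNat + 1 := by omega
      rw [selFrom_cons, if_neg hcond, List.nil_append, ih (s + 1) k (by omega), hdrop,
        List.drop_succ_cons]

-- A's while loop produces the same consecutive cells
lemma aDiagLoop_eq (grid : List String) (H W : Nat) (hH : H = grid.length) :
    ∀ (n r c : Nat), H - r ≤ n →
    aDiagLoop grid H W r c
      = (List.range (min (H - r) (W - c))).map (fun i => pvCharAt (grid.getD (r + i) "") (c + i)) := by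
  intro n
  induction n with
  | zero =>
    intro r c h
    rw [aDiagLoop]
    have : ¬ (r < H ∧ c < W) := by omega
    simp [this, show min (H - r) (W - c) = min 0 (W - c) by omega]
  | succ m ih =>
    intro r c h
    rw [aDiagLoop]
    by_cases hrc : r < H ∧ c < W
    · rw [dif_pos hrc, ih (r + 1) (c + 1) (by omega)]
      have hmin : min (H - r) (W - c) = min (H - (r + 1)) (W - (c + 1)) + 1 := by omega
      rw [hmin, List.range_succ_eq_map]
      simp only [List.map_cons, List.map_map]
      refine congrArg₂ _ (by simp) ?_
      apply List.map_congr_left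
      intro i _
      simp [Function.comp, Nat.add_assoc, Nat.add_comm 1 i]
    · rw [dif_neg hrc]
      have : min (H - r) (W - c) = 0 := by omega
      simp [this]

lemma getD_drop (rows : List String) (n i : Nat) :
    (rows.drop n).getD i "" = rows.getD (n + i) "" := by
  simp [List.getD, List.getElem?_drop]

-- ===== VERDICT (by name: the statement is the Claim_ definition above) =====
theorem all_diagonals_SE_py_spec : Claim_equal_all_diagonals_SE_py := by
  intro grid _ _
  unfold Spec_all_diagonals_SE_py all_diagonals_SE_py all_diagonals_SE_py_alt
  simp only
  congr 1
  · apply List.map_congr_left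
    intro r0 hr0
    rw [List.mem_range] at hr0
    congr 1
    rw [bucket_getD, selFrom_skip _ _ _ _ (by omega),
        selFrom_started _ _ _ _ (by omega),
        aDiagLoop_eq grid _ _ rfl (grid.length) r0 0 (by omega)]
    simp only [Int.sub_zero, Int.sub_self, Int.toNat_zero, Int.toNat_natCast, Nat.zero_add,
      Nat.sub_zero, List.length_drop]
    apply List.map_congr_left
    intro i _
    rw [getD_drop]
  · apply List.map_congr_left
    intro c0 hc0
    rw [List.mem_range'] at hc0
    obtain ⟨j, hj1, hj2⟩ := hc0
    congr 1
    rw [bucket_getD, selFrom_started _ _ _ _ (by omega),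
        aDiagLoop_eq grid _ _ rfl (grid.length) 0 c0 (by omega)]
    rw [show ((0 : Int) - (-(c0 : Int))).toNat = c0 by omega]
    simp
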